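-- pv_equiv track=rewrite | github.com/chyt123/cosmos | coding_everyday/interview/booking/0701.py | employeeWithLesser
-- ===== SOURCE A (Python) =====
-- import collections
--
-- def employeeWithLesser(employeeCalls, k):
--     ans = []
--     employees = collections.defaultdict(list)
--     for i, j, l in employeeCalls:
--         employees[i].append([j, l])
--     for i in employees:
--         cnt = 0
--         for j in range(1, len(employees[i])):
--             if employees[i][j][0] > employees[i][j - 1][1]:
--                 cnt += 1
--         if cnt < k:
--             ans.append("{} {}".format(i, cnt))
--     return ans
-- ===== SOURCE B (Python) =====
-- def employeeWithLesser(employeeCalls, k):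
--     state = {}
--     for i, j, l in employeeCalls:
--         if i in state:
--             last_end, cnt = state[i]
--             state[i] = (l, cnt + 1 if j > last_end else cnt)
--         else:
--             state[i] = (l, 0)
--     return ["{} {}".format(i, cnt) for i, (_, cnt) in state.items() if cnt < k]
-- ===== Notes on version B (the rewrite author's own statement) =====
-- stated objective: alternative
-- what changed: Replaces the group-into-lists-then-adjacent-index-scan with a single streaming pass that keeps only (last_end, transition count) per employee in an ordered dict, then emits the qualifying rows.
import Mathlib
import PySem

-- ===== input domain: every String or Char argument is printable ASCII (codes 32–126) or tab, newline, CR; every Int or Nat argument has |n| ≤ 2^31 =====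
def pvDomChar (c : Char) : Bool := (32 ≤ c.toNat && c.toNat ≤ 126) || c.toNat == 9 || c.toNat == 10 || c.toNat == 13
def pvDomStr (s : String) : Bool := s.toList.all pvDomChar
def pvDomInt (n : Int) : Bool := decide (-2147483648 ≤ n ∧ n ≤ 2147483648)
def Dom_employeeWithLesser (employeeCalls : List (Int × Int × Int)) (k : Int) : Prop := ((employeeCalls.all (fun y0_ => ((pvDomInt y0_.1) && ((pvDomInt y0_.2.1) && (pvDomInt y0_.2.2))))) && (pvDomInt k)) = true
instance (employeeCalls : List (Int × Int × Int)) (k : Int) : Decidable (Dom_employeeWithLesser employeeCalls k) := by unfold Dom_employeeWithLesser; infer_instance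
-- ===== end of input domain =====

-- B replaces A's group-into-lists-then-adjacent-scan with one streaming pass keeping only (last_end, count) per employee (alternative decomposition, same asymptotic cost).


-- ===== PORT A =====
def employeeWithLesser (employeeCalls : List (Int × Int × Int)) (k : Int) : List String :=
  let employees : PySem.Dict Int (List (Int × Int)) :=
    employeeCalls.foldl (fun d t => d.modify t.1 [] (fun l => l ++ [t.2])) PySem.Dict.empty
  employees.keys.foldl (fun ans i =>
    let lst := employees.getD i []
    let cnt : Int := (PySem.List.pyRange 1 (lst.length : Int) 1).foldl
      (fun cnt j =>
        if (PySem.List.pyGetD lst j (0, 0)).1 > (PySem.List.pyGetD lst (j - 1) (0, 0)).2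
        then cnt + 1 else cnt) 0
    if cnt < k then ans ++ [PySem.Int.toStr i ++ " " ++ PySem.Int.toStr cnt] else ans) []

-- ===== PORT B =====
-- one streaming step: employee t.1 called on [t.2.1, t.2.2]
def ewlStep (d : PySem.Dict Int (Int × Int)) (t : Int × Int × Int) : PySem.Dict Int (Int × Int) :=
  d.insert t.1 (match d.get? t.1 with
    | some p => (t.2.2, if t.2.1 > p.1 then p.2 + 1 else p.2)
    | none => (t.2.2, (0 : Int)))

def employeeWithLesser_alt (employeeCalls : List (Int × Int × Int)) (k : Int) : List String :=
  let state := employeeCalls.foldl ewlStep PySem.Dict.empty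
  state.items.foldl (fun ans p =>
    if p.2.2 < k then ans ++ [PySem.Int.toStr p.1 ++ " " ++ PySem.Int.toStr p.2.2] else ans) []

-- ===== PRECONDITION & SPEC =====
def Spec_employeeWithLesser (employeeCalls : List (Int × Int × Int)) (k : Int) (out : List String) : Prop := out = employeeWithLesser_alt employeeCalls k
instance (employeeCalls : List (Int × Int × Int)) (k : Int) (out : List String) : Decidable (Spec_employeeWithLesser employeeCalls k out) := by unfold Spec_employeeWithLesser; infer_instance

-- ===== CLAIM (what is proved, stated in full; the proofs are below) =====
def Claim_equal_employeeWithLesser : Prop := ∀ (employeeCalls : List (Int × Int × Int)) (k : Int), Dom_employeeWithLesser employeeCalls k → Spec_employeeWithLesser employeeCalls k (employeeWithLesser employeeCalls k)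

-- ===== LEMMAS AND PROOFS =====

-- adjacent-transition count of a call list, given the previous end e
def ewlCnt (e : Int) : List (Int × Int) → Int
  | [] => 0
  | p :: r => (if p.1 > e then 1 else 0) + ewlCnt p.2 r

-- the streaming state after consuming a call list
def ewlRun (st : Option (Int × Int)) (l : List (Int × Int)) : Option (Int × Int) :=
  l.foldl (fun st p => some (match st with
    | some q => (p.2, if p.1 > q.1 then q.2 + 1 else q.2)
    | none => (p.2, (0 : Int)))) st

lemma ewlRun_some (l : List (Int × Int)) : ∀ (e c : Int),
    ewlRun (some (e, c)) l = some (((l.map (·.2)).getLastD e, c + ewlCnt e l)) := by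
  induction l with
  | nil => intro e c; simp [ewlRun, ewlCnt]
  | cons p r ih =>
      intro e c
      show ewlRun (some (p.2, if p.1 > e then c + 1 else c)) r = _
      rw [ih]
      simp only [ewlCnt, List.map_cons, List.getLastD_cons]
      split_ifs <;> simp <;> ring

-- B's dict lookup is the stream over the calls filtered to that employee
lemma ewl_get?_foldl (l : List (Int × Int × Int)) : ∀ (d : PySem.Dict Int (Int × Int)) (c : Int),
    (l.foldl ewlStep d).get? c = ewlRun (d.get? c) ((l.filter (fun t => t.1 == c)).map (·.2)) := by
  induction l with
  | nil => intro d c; simp [ewlRun]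
  | cons t r ih =>
      intro d c
      simp only [List.foldl_cons]
      rw [ih]
      by_cases h : t.1 = c
      · subst h
        rw [List.filter_cons_of_pos (by simp)]
        rw [show (ewlStep d t).get? t.1 = _ from PySem.Dict.get?_insert_self d _ _]
        cases hd : d.get? t.1 <;> simp [ewlRun]
      · rw [List.filter_cons_of_neg (by simp [h])]
        rw [show (ewlStep d t).get? c = d.get? c from
          PySem.Dict.get?_insert_of_ne d _ (fun hc => h hc.symm)]

-- A's per-employee list is the calls filtered to that employee
lemma ewl_getD_foldl_modify (l : List (Int × Int × Int)) (c : Int) :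
    ((l.foldl (fun d t => d.modify t.1 [] (fun l => l ++ [t.2])) (PySem.Dict.empty : PySem.Dict Int (List (Int × Int)))).getD c [])
      = (l.filter (fun t => t.1 == c)).map (·.2) := by
  rw [PySem.Dict.getD_foldl_modify_append]
  simp [PySem.Dict.getD_eq_get?_getD]

lemma ewl_pyGetD_pos (x : Int × Int) (xs : List (Int × Int)) (j : Int) (hj : 1 ≤ j) :
    PySem.List.pyGetD (x :: xs) j (0, 0) = PySem.List.pyGetD xs (j - 1) (0, 0) := by
  obtain ⟨m, hm⟩ : ∃ m : Nat, j = (m : Int) + 1 := ⟨(j - 1).toNat, by omega⟩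
  subst hm
  have h1 : ((m : Int) + 1) = ((m + 1 : Nat) : Int) := by push_cast; ring
  have h2 : ((m : Int) + 1 - 1) = ((m : Nat) : Int) := by ring
  rw [h2, h1, PySem.List.pyGetD_natCast, PySem.List.pyGetD_natCast]
  simp

-- shifting an index-window fold by one cons cell
lemma ewl_shift (x : Int × Int) (xs : List (Int × Int)) (a : Int) (ha : 1 ≤ a) (c : Int) :
    (PySem.List.pyRange (a + 1) ((xs.length : Int) + 1) 1).foldl
      (fun cnt j =>
        if (PySem.List.pyGetD (x :: xs) j (0, 0)).1 > (PySem.List.pyGetD (x :: xs) (j - 1) (0, 0)).2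
        then cnt + 1 else cnt) c
    = (PySem.List.pyRange a ((xs.length : Int)) 1).foldl
      (fun cnt j =>
        if (PySem.List.pyGetD xs j (0, 0)).1 > (PySem.List.pyGetD xs (j - 1) (0, 0)).2
        then cnt + 1 else cnt) c := by
  rw [PySem.List.pyRange_one (a + 1), PySem.List.pyRange_one a]
  have hlen : ((xs.length : Int) + 1 - (a + 1)).toNat = ((xs.length : Int) - a).toNat := by omega
  rw [hlen, List.foldl_map, List.foldl_map]
  apply PySem.List.foldl_congr_mem
  intro acc m _
  have e1 : a + 1 + (m : Int) - 1 = a + (m : Int) := by ring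
  rw [e1, ewl_pyGetD_pos x xs (a + 1 + (m : Int)) (by omega),
      ewl_pyGetD_pos x xs (a + (m : Int)) (by omega)]
  have e2 : a + 1 + (m : Int) - 1 = a + (m : Int) := by ring
  rw [e2]

-- A's index loop computes ewlCnt
lemma ewl_cnt_loop (l : List (Int × Int)) : ∀ (p : Int × Int) (c0 : Int),
    (PySem.List.pyRange 1 (((p :: l).length : Int)) 1).foldl
      (fun cnt j =>
        if (PySem.List.pyGetD (p :: l) j (0, 0)).1 > (PySem.List.pyGetD (p :: l) (j - 1) (0, 0)).2
        then cnt + 1 else cnt) c0 = c0 + ewlCnt p.2 l := by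
  induction l with
  | nil =>
      intro p c0
      rw [PySem.List.pyRange_one_eq_nil (by simp)]
      simp [ewlCnt]
  | cons q r ih =>
      intro p c0
      have hlen : (((p :: q :: r).length : Int)) = (((q :: r).length : Int)) + 1 := by
        simp [List.length_cons]
      rw [hlen, @PySem.List.pyRange_one_cons 1 ((((q :: r).length : Int)) + 1) (by simp), List.foldl_cons]
      rw [ewl_shift p (q :: r) 1 le_rfl]
      have hget1 : PySem.List.pyGetD (p :: q :: r) 1 (0, 0) = q := by
        rw [ewl_pyGetD_pos p (q :: r) 1 le_rfl]
        norm_num [PySem.List.pyGetD_zero_cons]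
      have hget0 : PySem.List.pyGetD (p :: q :: r) (1 - 1) (0, 0) = p := by
        norm_num [PySem.List.pyGetD_zero_cons]
      rw [hget1, hget0, ih q]
      simp only [ewlCnt]
      split_ifs <;> ring

def ewlVal (d : PySem.Dict Int (Int × Int)) (t : Int × Int × Int) : Int × Int :=
  match d.get? t.1 with
  | some p => (t.2.2, if t.2.1 > p.1 then p.2 + 1 else p.2)
  | none => (t.2.2, (0 : Int))

-- ===== VERDICT (by name: the statement is the Claim_ definition above) =====
theorem employeeWithLesser_spec : Claim_equal_employeeWithLesser := by
  intro calls k _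
  unfold Spec_employeeWithLesser employeeWithLesser employeeWithLesser_alt
  set dA := calls.foldl (fun d t => d.modify t.1 [] (fun l => l ++ [t.2]))
      (PySem.Dict.empty : PySem.Dict Int (List (Int × Int))) with hdA
  set dB := calls.foldl ewlStep (PySem.Dict.empty : PySem.Dict Int (Int × Int)) with hdB
  dsimp only
  have hBu : dB = List.foldl
      (fun (d : PySem.Dict Int (Int × Int)) (t : Int × Int × Int) => d.insert t.1 (ewlVal d t))
      PySem.Dict.empty calls := rfl
  have hnodup : dB.keys.Nodup := by
    rw [hBu]
    exact PySem.Dict.nodup_keys_foldl_insert_key calls (·.1) ewlVal _ PySem.Dict.nodup_keys_empty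
  have hkeys : dA.keys = dB.keys := by
    rw [hdA, hBu]
    rw [PySem.Dict.keys_foldl_modify_key calls (·.1) [] (fun _ t l => l ++ [t.2]),
        PySem.Dict.keys_foldl_insert_key calls (·.1) ewlVal]
    simp
  rw [PySem.Dict.items_eq_map_keys dB hnodup (0, 0), List.foldl_map, ← hkeys]
  apply PySem.List.foldl_congr_mem
  intro acc c hc
  have hc' : c ∈ calls.map (·.1) := by
    have : dA.keys = PySem.Set.ofList (calls.map (·.1)) := by
      rw [hdA, PySem.Dict.keys_foldl_modify_key calls (·.1) [] (fun _ t l => l ++ [t.2])]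
      simp [PySem.Set.update_nil_left]
    rw [this, PySem.Set.mem_ofList] at hc
    exact hc
  -- the filtered call list for c is nonempty
  obtain ⟨p, rest, hpairs⟩ : ∃ p rest,
      (calls.filter (fun t => t.1 == c)).map (·.2) = p :: rest := by
    obtain ⟨t, ht, hteq⟩ := List.mem_map.mp hc'
    have hmem : t.2 ∈ (calls.filter (fun t => t.1 == c)).map (·.2) :=
      List.mem_map_of_mem (List.mem_filter.mpr ⟨ht, by simp [hteq]⟩)
    cases hl : (calls.filter (fun t => t.1 == c)).map (·.2) with
    | nil => rw [hl] at hmem; cases hmem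
    | cons p rest => exact ⟨p, rest, rfl⟩
  have hA : dA.getD c [] = p :: rest := by rw [hdA, ewl_getD_foldl_modify, hpairs]
  have hB : dB.getD c (0, 0) =
      (((rest.map (·.2)).getLastD p.2), 0 + ewlCnt p.2 rest) := by
    rw [PySem.Dict.getD_eq_get?_getD, hdB, ewl_get?_foldl, PySem.Dict.get?_empty, hpairs]
    rw [show ewlRun none (p :: rest) = ewlRun (some (p.2, 0)) rest from rfl, ewlRun_some]
    rfl
  rw [hA, hB, ewl_cnt_loop rest p 0]
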